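-- pv_equiv track=rewrite | github.com/TobiasAsk/advent-of-code | 2024/day_12/solution.py | get_num_sides
-- ===== SOURCE A (Python) =====
-- DIRECTIONS = [
--     (1, 0),
--     (0, 1),
--     (-1, 0),
--     (0, -1)
-- ]
--
-- def get_num_sides(region: set[tuple[int]]) -> int:
--     '''The number of corners equals the number of sides!
--     Start anywhere, move through each plot and count the number of corners'''
--
--     num_sides = 0
--     for x, y in region:
--         for rotation in range(4):
--             dx, dy = DIRECTIONS[rotation]
--             ccw_dx, ccw_dy = DIRECTIONS[(rotation-1) % 4]
--             is_inner_corner = ((x+dx, y+dy) in region and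
--                                (x+ccw_dx, y+ccw_dy) in region and
--                                (x+dx+ccw_dx, y+dy+ccw_dy) not in region)
--
--             is_outer_corner = ((x+dx, y+dy) not in region and
--                                (x+ccw_dx, y+ccw_dy) not in region)
--
--             num_sides += is_outer_corner or is_inner_corner
--
--     return num_sides
-- ===== SOURCE B (Python) =====
-- def _vertex_corners(region, vx, vy):
--     """Corners contributed at lattice vertex (vx, vy), from the 2x2 cell pattern around it."""
--     inside = [(vx - 1, vy - 1) in region, (vx, vy - 1) in region,
--               (vx - 1, vy) in region, (vx, vy) in region]
--     n = sum(inside)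
--     if n == 1 or n == 3:
--         return 1
--     if n == 2 and inside[0] == inside[3]:  # two diagonally opposite cells
--         return 2
--     return 0
--
--
-- def get_num_sides(region: set[tuple[int]]) -> int:
--     vertices = {(x + a, y + b) for x, y in region for a in (0, 1) for b in (0, 1)}
--     return sum(_vertex_corners(region, vx, vy) for vx, vy in vertices)
-- ===== Notes on version B (the rewrite author's own statement) =====
-- stated objective: alternative
-- what changed: Instead of scanning each cell's 4 rotations for inner/outer corner configurations, B enumerates the lattice vertices touching the region and scores each vertex once from its 2x2 cell-membership pattern (1 corner for 1 or 3 cells inside, 2 for a diagonal pair, else 0).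
import Mathlib
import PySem

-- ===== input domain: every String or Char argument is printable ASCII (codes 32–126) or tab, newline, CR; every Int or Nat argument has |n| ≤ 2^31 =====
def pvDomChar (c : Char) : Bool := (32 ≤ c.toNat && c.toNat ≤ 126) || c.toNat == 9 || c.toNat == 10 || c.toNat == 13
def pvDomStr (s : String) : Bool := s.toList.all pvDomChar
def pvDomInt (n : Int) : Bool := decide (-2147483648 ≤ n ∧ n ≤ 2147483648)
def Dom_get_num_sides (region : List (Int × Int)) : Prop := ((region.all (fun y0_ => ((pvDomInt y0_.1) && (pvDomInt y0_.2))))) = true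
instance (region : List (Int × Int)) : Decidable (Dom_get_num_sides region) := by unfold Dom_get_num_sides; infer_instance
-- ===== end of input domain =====

-- B replaces A's per-cell rotation scan by scoring each lattice vertex once from its 2x2
-- cell-membership pattern (alternative decomposition, same asymptotic cost).


-- ===== PORT A =====
def pvDIRECTIONS : List (Int × Int) := [(1, 0), (0, 1), (-1, 0), (0, -1)]

def get_num_sides (region : List (Int × Int)) : Int :=
  region.foldl (fun num_sides c =>
    (PySem.List.pyRange 0 4 1).foldl (fun ns rotation =>
      let d := PySem.List.pyGetD pvDIRECTIONS rotation (0, 0)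
      let p := PySem.List.pyGetD pvDIRECTIONS (PySem.Int.mod (rotation - 1) 4) (0, 0)
      let is_inner : Bool := decide ((c.1 + d.1, c.2 + d.2) ∈ region) &&
                             decide ((c.1 + p.1, c.2 + p.2) ∈ region) &&
                             !decide ((c.1 + d.1 + p.1, c.2 + d.2 + p.2) ∈ region)
      let is_outer : Bool := !decide ((c.1 + d.1, c.2 + d.2) ∈ region) &&
                             !decide ((c.1 + p.1, c.2 + p.2) ∈ region)
      ns + (if (is_outer || is_inner) then 1 else 0)) num_sides) 0

-- ===== PORT B =====
def pvVertexList (region : List (Int × Int)) : List (Int × Int) :=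
  region.flatMap (fun c => [(c.1, c.2), (c.1, c.2 + 1), (c.1 + 1, c.2), (c.1 + 1, c.2 + 1)])

def pvVertexCorners (region : List (Int × Int)) (v : Int × Int) : Int :=
  let inside : List Bool := [decide ((v.1 - 1, v.2 - 1) ∈ region), decide ((v.1, v.2 - 1) ∈ region),
                             decide ((v.1 - 1, v.2) ∈ region), decide ((v.1, v.2) ∈ region)]
  let n : Int := (inside.map (fun b => if b then (1 : Int) else 0)).sum
  if n = 1 ∨ n = 3 then 1
  else if n = 2 ∧ inside[0]! = inside[3]! then 2
  else 0

def get_num_sides_alt (region : List (Int × Int)) : Int :=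
  ((PySem.Set.ofList (pvVertexList region)).map (fun v => pvVertexCorners region v)).sum

-- ===== PRECONDITION & SPEC =====
-- region is a Python set, so its list encoding holds DISTINCT elements; Pre_ excludes lists with
-- duplicate pairs, which do not encode a set and on which A's per-occurrence double count is accidental.
def Pre_get_num_sides (region : List (Int × Int)) : Prop := region.Nodup
instance (region : List (Int × Int)) : Decidable (Pre_get_num_sides region) := by unfold Pre_get_num_sides; infer_instance

def pvWitness_get_num_sides : (List (Int × Int)) := ([(0, 0), (1, 0)])

def Spec_get_num_sides (region : List (Int × Int)) (out : Int) : Prop := out = get_num_sides_alt region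
instance (region : List (Int × Int)) (out : Int) : Decidable (Spec_get_num_sides region out) := by unfold Spec_get_num_sides; infer_instance

-- ===== CLAIM (what is proved, stated in full; the proofs are below) =====
def Claim_equal_get_num_sides : Prop := ∀ (region : List (Int × Int)), Dom_get_num_sides region → Pre_get_num_sides region → Spec_get_num_sides region (get_num_sides region)

-- ===== LEMMAS AND PROOFS =====

-- A's corner indicator for one cell and one rotation (d forward, p counterclockwise of d).
def pvInd (R : List (Int × Int)) (c d p : Int × Int) : Int :=
  if ((!decide ((c.1 + d.1, c.2 + d.2) ∈ R) && !decide ((c.1 + p.1, c.2 + p.2) ∈ R)) ||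
      (decide ((c.1 + d.1, c.2 + d.2) ∈ R) && decide ((c.1 + p.1, c.2 + p.2) ∈ R) &&
       !decide ((c.1 + d.1 + p.1, c.2 + d.2 + p.2) ∈ R))) then 1 else 0

-- A's per-cell contribution: the four rotations.
def pvCell (R : List (Int × Int)) (c : Int × Int) : Int :=
  pvInd R c (1, 0) (0, -1) + pvInd R c (0, 1) (1, 0) +
  pvInd R c (-1, 0) (0, 1) + pvInd R c (0, -1) (-1, 0)

-- vertex-side summand: the corner that cell (v - o) contributes at vertex v, if that cell is in R.
def pvH (R : List (Int × Int)) (d p o : Int × Int) (v : Int × Int) : Int :=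
  if (v.1 - o.1, v.2 - o.2) ∈ R then pvInd R (v.1 - o.1, v.2 - o.2) d p else 0

theorem pvA_eq (region : List (Int × Int)) :
    get_num_sides region = (region.map (pvCell region)).sum := by
  have hbody : (fun (num_sides : Int) (c : Int × Int) =>
      (PySem.List.pyRange 0 4 1).foldl (fun ns rotation =>
        let d := PySem.List.pyGetD pvDIRECTIONS rotation (0, 0)
        let p := PySem.List.pyGetD pvDIRECTIONS (PySem.Int.mod (rotation - 1) 4) (0, 0)
        let is_inner : Bool := decide ((c.1 + d.1, c.2 + d.2) ∈ region) &&
                               decide ((c.1 + p.1, c.2 + p.2) ∈ region) &&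
                               !decide ((c.1 + d.1 + p.1, c.2 + d.2 + p.2) ∈ region)
        let is_outer : Bool := !decide ((c.1 + d.1, c.2 + d.2) ∈ region) &&
                               !decide ((c.1 + p.1, c.2 + p.2) ∈ region)
        ns + (if (is_outer || is_inner) then 1 else 0)) num_sides)
      = (fun ns c => ns + pvCell region c) := by
    funext ns c
    have hr : PySem.List.pyRange 0 4 1 = [0, 1, 2, 3] := by decide
    rw [hr]
    show ns + _ + _ + _ + _ = ns + pvCell region c
    have h0 : PySem.List.pyGetD pvDIRECTIONS 0 (0, 0) = ((1 : Int), (0 : Int)) := by decide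
    have h1 : PySem.List.pyGetD pvDIRECTIONS 1 (0, 0) = ((0 : Int), (1 : Int)) := by decide
    have h2 : PySem.List.pyGetD pvDIRECTIONS 2 (0, 0) = ((-1 : Int), (0 : Int)) := by decide
    have h3 : PySem.List.pyGetD pvDIRECTIONS 3 (0, 0) = ((0 : Int), (-1 : Int)) := by decide
    have m0 : PySem.List.pyGetD pvDIRECTIONS (PySem.Int.mod ((0 : Int) - 1) 4) (0, 0) = ((0 : Int), (-1 : Int)) := by decide
    have m1 : PySem.List.pyGetD pvDIRECTIONS (PySem.Int.mod ((1 : Int) - 1) 4) (0, 0) = ((1 : Int), (0 : Int)) := by decide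
    have m2 : PySem.List.pyGetD pvDIRECTIONS (PySem.Int.mod ((2 : Int) - 1) 4) (0, 0) = ((0 : Int), (1 : Int)) := by decide
    have m3 : PySem.List.pyGetD pvDIRECTIONS (PySem.Int.mod ((3 : Int) - 1) 4) (0, 0) = ((-1 : Int), (0 : Int)) := by decide
    rw [h0, h1, h2, h3, m0, m1, m2, m3]
    simp only [pvCell, pvInd]
    ring
  unfold get_num_sides
  rw [hbody, PySem.List.foldl_add]
  simp

theorem pv_sum_map {f : (Int × Int) → Int} (l : List (Int × Int)) (h : l.Nodup) :
    (l.map f).sum = ∑ c ∈ l.toFinset, f c := by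
  induction l with
  | nil => simp
  | cons x xs ih =>
    rcases List.nodup_cons.mp h with ⟨hx, hxs⟩
    rw [List.map_cons, List.sum_cons, List.toFinset_cons,
      Finset.sum_insert (by simpa using hx), ih hxs]

theorem pvB_eq (region : List (Int × Int)) :
    get_num_sides_alt region = ∑ v ∈ (pvVertexList region).toFinset, pvVertexCorners region v := by
  unfold get_num_sides_alt
  rw [pv_sum_map _ (PySem.Set.nodup_ofList _)]
  congr 1
  ext v
  simp [PySem.Set.mem_ofList]

-- the 2x2-pattern score at a vertex splits into the four per-cell corner indicators there
theorem pv_vertex_split (R : List (Int × Int)) (v : Int × Int) :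
    pvVertexCorners R v =
      pvH R (1, 0) (0, -1) (1, 0) v + pvH R (0, 1) (1, 0) (1, 1) v +
      pvH R (-1, 0) (0, 1) (0, 1) v + pvH R (0, -1) (-1, 0) (0, 0) v := by
  obtain ⟨x, y⟩ := v
  have e1 : x - 1 + 1 = x := by ring
  have e2 : y - 1 + 1 = y := by ring
  have e3 : x + 1 + -1 = x := by ring
  have e4 : y + 1 + -1 = y := by ring
  have e5 : x + -1 = x - 1 := by ring
  have e6 : y + -1 = y - 1 := by ring
  by_cases h00 : (x - 1, y - 1) ∈ R <;> by_cases h10 : (x, y - 1) ∈ R <;>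
    by_cases h01 : (x - 1, y) ∈ R <;> by_cases h11 : (x, y) ∈ R <;>
    simp [pvVertexCorners, pvH, pvInd, h00, h10, h01, h11, e1, e2, e5, e6]

theorem pv_shift (R : List (Int × Int)) (f : Int → Int → Int) (o1 o2 : Int)
    (hmem : ∀ c ∈ R, (c.1 + o1, c.2 + o2) ∈ pvVertexList R) :
    (∑ v ∈ (pvVertexList R).toFinset,
      (if (v.1 - o1, v.2 - o2) ∈ R then f (v.1 - o1) (v.2 - o2) else 0))
    = ∑ c ∈ R.toFinset, f c.1 c.2 := by
  rw [← Finset.sum_filter]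
  have himg : (pvVertexList R).toFinset.filter (fun v => (v.1 - o1, v.2 - o2) ∈ R)
      = R.toFinset.image (fun c => (c.1 + o1, c.2 + o2)) := by
    ext ⟨v1, v2⟩
    simp only [Finset.mem_filter, List.mem_toFinset, Finset.mem_image]
    constructor
    · rintro ⟨hv, hr⟩
      refine ⟨(v1 - o1, v2 - o2), hr, ?_⟩
      simp only [Prod.mk.injEq]
      constructor <;> ring
    · rintro ⟨c, hc, hco⟩
      injection hco with hco1 hco2
      subst hco1; subst hco2
      refine ⟨hmem c hc, ?_⟩
      simpa using hc
  rw [himg, Finset.sum_image (by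
    intro a _ b _ hab
    simp only [Prod.mk.injEq] at hab
    obtain ⟨h1, h2⟩ := hab
    exact Prod.ext (by omega) (by omega))]
  apply Finset.sum_congr rfl
  intro c _
  simp

theorem pv_mem_vertexList (R : List (Int × Int)) (o : Int × Int)
    (ho : o ∈ ([((0 : Int), (0 : Int)), (0, 1), (1, 0), (1, 1)] : List (Int × Int))) :
    ∀ c ∈ R, (c.1 + o.1, c.2 + o.2) ∈ pvVertexList R := by
  intro c hc
  unfold pvVertexList
  rw [List.mem_flatMap]
  refine ⟨c, hc, ?_⟩
  fin_cases ho <;> simp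

-- ===== VERDICT (by name: the statement is the Claim_ definition above) =====
theorem get_num_sides_spec : Claim_equal_get_num_sides := by
  intro region _ hpre
  unfold Spec_get_num_sides
  rw [pvA_eq, pvB_eq, pv_sum_map _ hpre]
  have hsplit : ∑ v ∈ (pvVertexList region).toFinset, pvVertexCorners region v
      = ∑ v ∈ (pvVertexList region).toFinset,
          (pvH region (1, 0) (0, -1) (1, 0) v + pvH region (0, 1) (1, 0) (1, 1) v +
           pvH region (-1, 0) (0, 1) (0, 1) v + pvH region (0, -1) (-1, 0) (0, 0) v) :=
    Finset.sum_congr rfl (fun v _ => pv_vertex_split region v)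
  rw [hsplit]
  simp only [Finset.sum_add_distrib]
  simp only [pvH]
  rw [pv_shift region (fun a b => pvInd region (a, b) (1, 0) (0, -1)) 1 0
        (pv_mem_vertexList region (1, 0) (by simp)),
      pv_shift region (fun a b => pvInd region (a, b) (0, 1) (1, 0)) 1 1
        (pv_mem_vertexList region (1, 1) (by simp)),
      pv_shift region (fun a b => pvInd region (a, b) (-1, 0) (0, 1)) 0 1
        (pv_mem_vertexList region (0, 1) (by simp)),
      pv_shift region (fun a b => pvInd region (a, b) (0, -1) (-1, 0)) 0 0
        (pv_mem_vertexList region (0, 0) (by simp))]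
  rw [← Finset.sum_add_distrib, ← Finset.sum_add_distrib, ← Finset.sum_add_distrib]
  refine Finset.sum_congr rfl ?_
  rintro ⟨a, b⟩ _
  simp [pvCell]
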